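-- pv_equiv track=rewrite | github.com/senigami/audiobook-studio | app/domain/chapters/compatibility_helpers.py | _derive_block_status
-- ===== SOURCE A (Python) =====
-- from collections.abc import Sequence
-- from typing import Any
--
-- def _derive_block_status(source_rows: Sequence[dict[str, Any]]) -> str:
--     statuses = [str(row.get("audio_status") or "unprocessed") for row in source_rows]
--     if any(status in {"failed", "error"} for status in statuses):
--         return "failed"
--     if any(status == "processing" for status in statuses):
--         return "rendering"
--     if any(status in {"queued", "preparing", "finalizing"} for status in statuses):
--         return "queued"
--     if all(status == "done" for status in statuses):
--         return "rendered"
--     if any(status == "done" for status in statuses):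
--         return "stale"
--     return "draft"
-- ===== SOURCE B (Python) =====
-- def _derive_block_status(source_rows):
--     # One pass: classify each row's status into a flag accumulator, then decide.
--     has_failed = has_processing = has_queued = has_done = has_other = False
--     for row in source_rows:
--         s = str(row.get("audio_status") or "unprocessed")
--         if s in ("failed", "error"):
--             has_failed = True
--         elif s == "processing":
--             has_processing = True
--         elif s in ("queued", "preparing", "finalizing"):
--             has_queued = True
--         elif s == "done":
--             has_done = True
--         else:
--             has_other = True
--     if has_failed:
--         return "failed"
--     if has_processing:
--         return "rendering"
--     if has_queued:
--         return "queued"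
--     if has_other:
--         return "stale" if has_done else "draft"
--     return "rendered"
-- ===== Notes on version B (the rewrite author's own statement) =====
-- stated objective: alternative
-- what changed: B replaces A's six separate scans of the status list by a single pass that classifies each row once into five boolean flags (failed/processing/queued/done/other) and then decides from the flags; 'all done' becomes 'no other and no higher-priority flag'.
import Mathlib
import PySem

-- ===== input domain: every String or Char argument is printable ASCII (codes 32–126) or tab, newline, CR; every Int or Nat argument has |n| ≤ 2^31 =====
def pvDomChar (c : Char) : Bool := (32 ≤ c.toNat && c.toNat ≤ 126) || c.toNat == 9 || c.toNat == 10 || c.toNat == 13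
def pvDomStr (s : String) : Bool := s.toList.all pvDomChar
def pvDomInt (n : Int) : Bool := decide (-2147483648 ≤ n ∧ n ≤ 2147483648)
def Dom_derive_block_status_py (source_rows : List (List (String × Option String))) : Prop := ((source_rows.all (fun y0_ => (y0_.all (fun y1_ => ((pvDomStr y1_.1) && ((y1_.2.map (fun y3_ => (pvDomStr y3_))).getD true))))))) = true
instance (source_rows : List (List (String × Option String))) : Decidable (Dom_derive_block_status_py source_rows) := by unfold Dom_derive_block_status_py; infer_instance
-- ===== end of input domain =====

-- B is an alternative decomposition: one classifying pass into five flags instead of A's six scans of the status list.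
-- ===== PORT A =====
-- str(row.get("audio_status") or "unprocessed"): None, a missing key and "" are falsy and yield "unprocessed"
def pvRowStatus (row : List (String × Option String)) : String :=
  match (PySem.Dict.mk row).get? "audio_status" with
  | some (some s) => if s = "" then "unprocessed" else s
  | _ => "unprocessed"

def derive_block_status_py (source_rows : List (List (String × Option String))) : String :=
  let statuses := source_rows.map pvRowStatus
  if statuses.any (fun status => PySem.Set.contains (PySem.Set.ofList ["failed", "error"]) status) then "failed"
  else if statuses.any (fun status => status == "processing") then "rendering"
  else if statuses.any (fun status => PySem.Set.contains (PySem.Set.ofList ["queued", "preparing", "finalizing"]) status) then "queued"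
  else if statuses.all (fun status => status == "done") then "rendered"
  else if statuses.any (fun status => status == "done") then "stale"
  else "draft"

-- ===== PORT B =====
-- flags: (has_failed, has_processing, has_queued, has_done, has_other)
def pvStep (acc : Bool × Bool × Bool × Bool × Bool) (row : List (String × Option String)) :
    Bool × Bool × Bool × Bool × Bool :=
  let s := pvRowStatus row
  let (f, p, q, d, o) := acc
  if s == "failed" || s == "error" then (true, p, q, d, o)
  else if s == "processing" then (f, true, q, d, o)
  else if s == "queued" || s == "preparing" || s == "finalizing" then (f, p, true, d, o)
  else if s == "done" then (f, p, q, true, o)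
  else (f, p, q, d, true)

def derive_block_status_py_alt (source_rows : List (List (String × Option String))) : String :=
  let (f, p, q, d, o) := source_rows.foldl pvStep (false, false, false, false, false)
  if f then "failed"
  else if p then "rendering"
  else if q then "queued"
  else if o then (if d then "stale" else "draft")
  else "rendered"

-- ===== PRECONDITION & SPEC =====
def Spec_derive_block_status_py (source_rows : List (List (String × Option String))) (out : String) : Prop := out = derive_block_status_py_alt source_rows
instance (source_rows : List (List (String × Option String))) (out : String) : Decidable (Spec_derive_block_status_py source_rows out) := by unfold Spec_derive_block_status_py; infer_instance

-- ===== CLAIM (what is proved, stated in full; the proofs are below) =====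
def Claim_equal_derive_block_status_py : Prop := ∀ (source_rows : List (List (String × Option String))), Dom_derive_block_status_py source_rows → Spec_derive_block_status_py source_rows (derive_block_status_py source_rows)

-- ===== LEMMAS AND PROOFS =====
def pvIsFail (s : String) : Bool := s == "failed" || s == "error"
def pvIsProc (s : String) : Bool := s == "processing"
def pvIsQueue (s : String) : Bool := s == "queued" || s == "preparing" || s == "finalizing"
def pvIsDone (s : String) : Bool := s == "done"
def pvIsOther (s : String) : Bool := !(pvIsFail s || pvIsProc s || pvIsQueue s || pvIsDone s)

lemma pvStep_eq (acc : Bool × Bool × Bool × Bool × Bool) (r : List (String × Option String)) :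
    pvStep acc r =
      (acc.1 || pvIsFail (pvRowStatus r),
       acc.2.1 || pvIsProc (pvRowStatus r),
       acc.2.2.1 || pvIsQueue (pvRowStatus r),
       acc.2.2.2.1 || pvIsDone (pvRowStatus r),
       acc.2.2.2.2 || pvIsOther (pvRowStatus r)) := by
  obtain ⟨f, p, q, d, o⟩ := acc
  unfold pvStep
  generalize pvRowStatus r = s
  by_cases h1 : (s == "failed" || s == "error") = true
  · simp only [Bool.or_eq_true, beq_iff_eq] at h1
    rcases h1 with h | h <;> subst h <;>
      simp [pvIsFail, pvIsProc, pvIsQueue, pvIsDone, pvIsOther]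
  · by_cases h2 : (s == "processing") = true
    · simp only [beq_iff_eq] at h2
      subst h2
      simp [pvIsFail, pvIsProc, pvIsQueue, pvIsDone, pvIsOther]
    · by_cases h3 : (s == "queued" || s == "preparing" || s == "finalizing") = true
      · simp only [Bool.or_eq_true, beq_iff_eq] at h3
        rcases h3 with (h | h) | h <;> subst h <;>
          simp [pvIsFail, pvIsProc, pvIsQueue, pvIsDone, pvIsOther]
      · by_cases h4 : (s == "done") = true
        · simp only [beq_iff_eq] at h4
          subst h4
          simp [pvIsFail, pvIsProc, pvIsQueue, pvIsDone, pvIsOther]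
        · simp only [Bool.not_eq_true] at h1 h2 h3 h4
          simp [pvIsFail, pvIsProc, pvIsQueue, pvIsDone, pvIsOther, h1, h2, h3, h4]

lemma foldl_pvStep (rows : List (List (String × Option String)))
    (acc : Bool × Bool × Bool × Bool × Bool) :
    rows.foldl pvStep acc =
      (acc.1 || (rows.map pvRowStatus).any pvIsFail,
       acc.2.1 || (rows.map pvRowStatus).any pvIsProc,
       acc.2.2.1 || (rows.map pvRowStatus).any pvIsQueue,
       acc.2.2.2.1 || (rows.map pvRowStatus).any pvIsDone,
       acc.2.2.2.2 || (rows.map pvRowStatus).any pvIsOther) := by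
  induction rows generalizing acc with
  | nil => simp
  | cons r rs ih =>
    rw [List.foldl_cons, pvStep_eq, ih]
    simp [Bool.or_assoc]

lemma contains_fail (s : String) :
    PySem.Set.contains (PySem.Set.ofList ["failed", "error"]) s = pvIsFail s := by
  rw [Bool.eq_iff_iff]
  simp [PySem.Set.mem_ofList, pvIsFail]

lemma contains_queue (s : String) :
    PySem.Set.contains (PySem.Set.ofList ["queued", "preparing", "finalizing"]) s = pvIsQueue s := by
  rw [Bool.eq_iff_iff]
  simp [PySem.Set.mem_ofList, pvIsQueue, or_assoc]

-- under no fail/proc/queue status, "all done" is exactly "no other"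
lemma all_done_of_no_other (l : List String)
    (hf : l.any pvIsFail = false) (hp : l.any pvIsProc = false) (hq : l.any pvIsQueue = false) :
    l.all pvIsDone = !(l.any pvIsOther) := by
  rw [Bool.eq_iff_iff]
  simp only [List.all_eq_true, Bool.not_eq_eq_eq_not, Bool.not_true, List.any_eq_false,
    List.any_eq_false] at *
  constructor
  · intro h s hs
    simp [pvIsOther, h s hs]
  · intro h s hs
    have h1 := hf s hs
    have h2 := hp s hs
    have h3 := hq s hs
    have h4 := h s hs
    simp [pvIsOther, h1, h2, h3] at h4
    exact h4

-- ===== VERDICT (by name: the statement is the Claim_ definition above) =====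
theorem derive_block_status_py_spec : Claim_equal_derive_block_status_py := by
  intro source_rows _
  unfold Spec_derive_block_status_py derive_block_status_py derive_block_status_py_alt
  rw [foldl_pvStep]
  simp only [Bool.false_or, contains_fail, contains_queue,
    show (fun status : String => status == "processing") = pvIsProc from rfl,
    show (fun status : String => status == "done") = pvIsDone from rfl]
  set l := source_rows.map pvRowStatus with hl
  by_cases hf : l.any pvIsFail <;> simp only [hf, if_true, if_false, Bool.false_eq_true]
  by_cases hp : l.any pvIsProc <;> simp only [hp, Bool.false_eq_true, reduceIte]
  by_cases hq : l.any pvIsQueue <;> simp only [hq, Bool.false_eq_true, reduceIte]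
  have hall := all_done_of_no_other l (by simpa using hf) (by simpa using hp) (by simpa using hq)
  by_cases ho : l.any pvIsOther = true
  · simp only [ho, Bool.not_true] at hall
    simp [hall, ho]
  · simp only [Bool.not_eq_true] at ho
    simp only [ho, Bool.not_false] at hall
    simp [hall, ho]
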